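-- pv_equiv track=rewrite | github.com/kauverysreerajendran/TTT-April2026 | InputScreening/services_reject.py | _build_accept_slots
-- ===== SOURCE A (Python) =====
-- from typing import Any, Dict, List, Optional, Tuple
--
-- def _build_accept_slots(accept_qty: int, capacity: int) -> List[Dict[str, Any]]:
--     """Distribute accept_qty into capacity-bound slots."""
--     slots: List[Dict[str, Any]] = []
--     if accept_qty <= 0 or capacity <= 0:
--         return slots
--     remaining = accept_qty
--     idx = 0
--     while remaining > 0:
--         fill = min(remaining, capacity)
--         slots.append({"slot_idx": idx, "qty": fill})
--         idx += 1
--         remaining -= fill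
--     return slots
-- ===== SOURCE B (Python) =====
-- from typing import Any, Dict, List
--
-- def _build_accept_slots(accept_qty: int, capacity: int) -> List[Dict[str, Any]]:
--     """Distribute accept_qty into capacity-bound slots (closed-form version)."""
--     if accept_qty <= 0 or capacity <= 0:
--         return []
--     full, rem = divmod(accept_qty, capacity)
--     slots = [{"slot_idx": i, "qty": capacity} for i in range(full)]
--     if rem > 0:
--         slots.append({"slot_idx": full, "qty": rem})
--     return slots
-- ===== Notes on version B (the rewrite author's own statement) =====
-- stated objective: simpler
-- what changed: Replaces the running-remainder while loop with a closed-form divmod: full slots come from a comprehension over range(accept_qty // capacity) and one remainder slot is appended iff the remainder is positive.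
import Mathlib
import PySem

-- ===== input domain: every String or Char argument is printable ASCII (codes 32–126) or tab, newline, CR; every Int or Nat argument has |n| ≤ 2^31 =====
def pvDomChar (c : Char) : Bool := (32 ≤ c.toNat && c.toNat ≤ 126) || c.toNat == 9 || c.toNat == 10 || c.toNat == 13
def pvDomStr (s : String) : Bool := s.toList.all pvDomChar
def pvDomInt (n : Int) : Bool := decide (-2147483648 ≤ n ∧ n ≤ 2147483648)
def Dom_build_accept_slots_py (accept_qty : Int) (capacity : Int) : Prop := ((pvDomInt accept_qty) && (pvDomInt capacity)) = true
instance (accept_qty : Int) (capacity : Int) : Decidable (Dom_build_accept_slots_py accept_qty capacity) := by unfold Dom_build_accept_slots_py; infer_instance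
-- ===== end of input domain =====

-- B replaces A's running-remainder while loop by a closed-form divmod + comprehension (objective: simpler).

-- ===== PORT A =====
-- the while loop of A; the hypothesis 0 < capacity mirrors the guard A passes before entering the loop
def buildLoop (capacity : Int) (hc : 0 < capacity) (remaining : Int) (idx : Int)
    (slots : List (List (String × Int))) : List (List (String × Int)) :=
  if h : remaining > 0 then
    let fill := min remaining capacity
    buildLoop capacity hc (remaining - fill) (idx + 1) (slots ++ [[("slot_idx", idx), ("qty", fill)]])
  else slots
termination_by remaining.toNat
decreasing_by omega

def build_accept_slots_py (accept_qty : Int) (capacity : Int) : List (List (String × Int)) :=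
  if h : accept_qty ≤ 0 ∨ capacity ≤ 0 then [] else
    buildLoop capacity (by omega) accept_qty 0 []

-- ===== PORT B =====
def build_accept_slots_py_alt (accept_qty : Int) (capacity : Int) : List (List (String × Int)) :=
  if accept_qty ≤ 0 ∨ capacity ≤ 0 then [] else
    let full := PySem.Int.floordiv accept_qty capacity
    let rem := PySem.Int.mod accept_qty capacity
    ((PySem.List.pyRange 0 full 1).map (fun i => [("slot_idx", i), ("qty", capacity)])) ++
      (if rem > 0 then [[("slot_idx", full), ("qty", rem)]] else [])

-- ===== PRECONDITION & SPEC =====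
def Spec_build_accept_slots_py (accept_qty : Int) (capacity : Int) (out : List (List (String × Int))) : Prop := out = build_accept_slots_py_alt accept_qty capacity
instance (accept_qty : Int) (capacity : Int) (out : List (List (String × Int))) : Decidable (Spec_build_accept_slots_py accept_qty capacity out) := by unfold Spec_build_accept_slots_py; infer_instance

-- ===== CLAIM (what is proved, stated in full; the proofs are below) =====
def Claim_equal_build_accept_slots_py : Prop := ∀ (accept_qty : Int) (capacity : Int), Dom_build_accept_slots_py accept_qty capacity → Spec_build_accept_slots_py accept_qty capacity (build_accept_slots_py accept_qty capacity)

-- ===== LEMMAS AND PROOFS =====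

lemma buildLoop_eq (c : Int) (hc : 0 < c) (r idx : Int) (slots : List (List (String × Int)))
    (hr : 0 ≤ r) :
    buildLoop c hc r idx slots =
      slots ++ ((PySem.List.pyRange idx (idx + PySem.Int.floordiv r c) 1).map
          (fun i => [("slot_idx", i), ("qty", c)]) ++
        (if PySem.Int.mod r c > 0 then
          [[("slot_idx", idx + PySem.Int.floordiv r c), ("qty", PySem.Int.mod r c)]] else [])) := by
  induction hn : r.toNat using Nat.strong_induction_on generalizing r idx slots with
  | _ n ih =>
    by_cases hr0 : r > 0
    · have hbounds : PySem.Int.floordiv r c * c ≤ r ∧ r < (PySem.Int.floordiv r c + 1) * c :=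
        (PySem.Int.floordiv_eq_iff_of_pos hc).mp rfl
      by_cases hrc : c ≤ r
      · -- fill = c, recurse on r - c
        have hfill : min r c = c := min_eq_right hrc
        have hfpos : 0 < PySem.Int.floordiv r c := by nlinarith [hbounds.1, hbounds.2]
        have hf : PySem.Int.floordiv (r - c) c = PySem.Int.floordiv r c - 1 := by
          rw [PySem.Int.floordiv_eq_iff_of_pos hc]
          constructor <;> nlinarith [hbounds.1, hbounds.2]
        have hm : PySem.Int.mod (r - c) c = PySem.Int.mod r c := by
          have e1 := PySem.Int.floordiv_mul_add_mod (r - c) c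
          have e2 := PySem.Int.floordiv_mul_add_mod r c
          rw [hf] at e1
          nlinarith [e1, e2]
        rw [buildLoop.eq_def, dif_pos hr0]
        simp only [hfill]
        rw [ih (r - c).toNat (by omega) (r - c) (idx + 1) _ (by omega) rfl]
        rw [hf, hm]
        rw [PySem.List.pyRange_one_cons (show idx < idx + PySem.Int.floordiv r c by omega)]
        have harg : idx + 1 + (PySem.Int.floordiv r c - 1) = idx + PySem.Int.floordiv r c := by ring
        simp [harg, List.append_assoc]
      · -- fill = r, next remaining is 0 and the loop stops
        have hfill : min r c = r := min_eq_left ((by omega))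
        have hf : PySem.Int.floordiv r c = 0 := by
          rw [PySem.Int.floordiv_eq_iff_of_pos hc]
          constructor <;> nlinarith
        have hm : PySem.Int.mod r c = r := by
          have e2 := PySem.Int.floordiv_mul_add_mod r c
          rw [hf] at e2; linarith [e2]
        rw [buildLoop.eq_def, dif_pos hr0]
        simp only [hfill, sub_self]
        rw [buildLoop.eq_def, dif_neg (by omega : ¬ (0:Int) > 0)]
        rw [hf, hm]
        simp [PySem.List.pyRange_one_eq_nil (le_refl idx), hr0]
    · -- r = 0
      have hr' : r = 0 := by omega
      subst hr'
      have hf : PySem.Int.floordiv 0 c = 0 := by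
        rw [PySem.Int.floordiv_eq_iff_of_pos hc]; constructor <;> nlinarith
      have hm : PySem.Int.mod 0 c = 0 := by
        have e2 := PySem.Int.floordiv_mul_add_mod 0 c
        rw [hf] at e2; linarith [e2]
      rw [buildLoop.eq_def, dif_neg hr0, hf, hm]
      simp [PySem.List.pyRange_one_eq_nil (le_refl idx)]

-- ===== VERDICT (by name: the statement is the Claim_ definition above) =====
theorem build_accept_slots_py_spec : Claim_equal_build_accept_slots_py := by
  intro q c _
  unfold Spec_build_accept_slots_py build_accept_slots_py build_accept_slots_py_alt
  by_cases h : q ≤ 0 ∨ c ≤ 0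
  · simp [h]
  · rw [dif_neg h, if_neg h]
    rw [buildLoop_eq c (by omega) q 0 [] (by omega)]
    simp
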